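-- pv_equiv track=rewrite | github.com/EvgeniyBoldov/ml-portal | backend/app/core/pat_validation.py | check_scope_permission
-- ===== SOURCE A (Python) =====
-- from typing import List, Set, Optional
--
-- SCOPE_HIERARCHY = {
--     "api:admin": ["api:read", "api:write"],
--     "api:write": ["api:read"],
--     "rag:admin": ["rag:read", "rag:write"],
--     "rag:write": ["rag:read"],
--     "chat:admin": ["chat:read", "chat:write"],
--     "chat:write": ["chat:read"],
--     "users:admin": ["users:read", "users:write"],
--     "users:write": ["users:read"],
-- }
--
-- def check_scope_permission(user_scopes: List[str], required_scope: str) -> bool: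
--     """
--     Check if user has permission for required scope
--
--     Args:
--         user_scopes: List of user's scopes
--         required_scope: Required scope to check
--
--     Returns:
--         True if user has permission
--     """
--     if not user_scopes:
--         return False
--
--     # Direct scope match
--     if required_scope in user_scopes:
--         return True
--
--     # Check if user has a higher-level scope that includes this one
--     for user_scope in user_scopes:
--         if user_scope in SCOPE_HIERARCHY and required_scope in SCOPE_HIERARCHY[user_scope]:
--             return True
--
--     return False
-- ===== SOURCE B (Python) =====
-- from typing import List
--
-- SCOPE_HIERARCHY = {
--     "api:admin": ["api:read", "api:write"],
--     "api:write": ["api:read"],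
--     "rag:admin": ["rag:read", "rag:write"],
--     "rag:write": ["rag:read"],
--     "chat:admin": ["chat:read", "chat:write"],
--     "chat:write": ["chat:read"],
--     "users:admin": ["users:read", "users:write"],
--     "users:write": ["users:read"],
-- }
--
-- # Inverted index built once at import time: child scope -> scopes that grant it.
-- GRANTED_BY = {}
-- for _parent, _children in SCOPE_HIERARCHY.items():
--     for _c in _children:
--         GRANTED_BY[_c] = GRANTED_BY.get(_c, []) + [_parent]
--
--
-- def check_scope_permission(user_scopes: List[str], required_scope: str) -> bool:
--     granting = {required_scope, *GRANTED_BY.get(required_scope, ())}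
--     return not granting.isdisjoint(user_scopes)
-- ===== Notes on version B (the rewrite author's own statement) =====
-- stated objective: alternative
-- what changed: B inverts the hierarchy once at module load into GRANTED_BY (child -> granting scopes), so the per-call work is a constant-size set {required_scope} | GRANTED_BY[required_scope] and one disjointness test against user_scopes, instead of A's per-call scan of user_scopes through the forward hierarchy.
import Mathlib
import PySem

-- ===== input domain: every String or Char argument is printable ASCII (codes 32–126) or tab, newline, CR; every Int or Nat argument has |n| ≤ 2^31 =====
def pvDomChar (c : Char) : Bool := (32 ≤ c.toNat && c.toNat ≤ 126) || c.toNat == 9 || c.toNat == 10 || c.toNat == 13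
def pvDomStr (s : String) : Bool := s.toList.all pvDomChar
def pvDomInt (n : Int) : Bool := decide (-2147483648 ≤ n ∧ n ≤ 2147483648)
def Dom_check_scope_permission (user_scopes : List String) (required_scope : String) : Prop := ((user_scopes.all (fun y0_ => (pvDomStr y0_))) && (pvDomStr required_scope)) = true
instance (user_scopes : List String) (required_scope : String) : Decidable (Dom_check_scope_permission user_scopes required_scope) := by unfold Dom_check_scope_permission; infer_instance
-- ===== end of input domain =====

-- B inverts the hierarchy once into GRANTED_BY (child -> granting scopes) and answers each call
-- with one disjointness test of {required_scope} | GRANTED_BY[required_scope] against user_scopes,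
-- replacing A's per-call scan of user_scopes through the forward hierarchy; objective: alternative.


def SCOPE_HIERARCHY : PySem.Dict String (List String) := PySem.Dict.ofList [
  ("api:admin", ["api:read", "api:write"]),
  ("api:write", ["api:read"]),
  ("rag:admin", ["rag:read", "rag:write"]),
  ("rag:write", ["rag:read"]),
  ("chat:admin", ["chat:read", "chat:write"]),
  ("chat:write", ["chat:read"]),
  ("users:admin", ["users:read", "users:write"]),
  ("users:write", ["users:read"])]

-- ===== PORT A =====
-- 'for user_scope in user_scopes: if user_scope in SCOPE_HIERARCHY and required_scope in SCOPE_HIERARCHY[user_scope]: return True'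
def cspLoop (required_scope : String) : List String → Bool
  | [] => false
  | user_scope :: rest =>
    if (match SCOPE_HIERARCHY.get? user_scope with
        | some vs => vs.contains required_scope
        | none => false) then true
    else cspLoop required_scope rest

def check_scope_permission (user_scopes : List String) (required_scope : String) : Bool :=
  if user_scopes = [] then false
  else if user_scopes.contains required_scope then true
  else cspLoop required_scope user_scopes

-- ===== PORT B =====
-- module-level loop of Source B: for _parent, _children in SCOPE_HIERARCHY.items():
--   for _c in _children: GRANTED_BY[_c] = GRANTED_BY.get(_c, []) + [_parent]
def GRANTED_BY : PySem.Dict String (List String) :=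
  SCOPE_HIERARCHY.items.foldl
    (fun d pc => pc.2.foldl (fun d c => d.insert c (d.getD c [] ++ [pc.1])) d)
    PySem.Dict.empty

-- granting = {required_scope, *GRANTED_BY.get(required_scope, ())}; return not granting.isdisjoint(user_scopes)
def check_scope_permission_alt (user_scopes : List String) (required_scope : String) : Bool :=
  let granting : PySem.Set String := PySem.Set.ofList (required_scope :: GRANTED_BY.getD required_scope [])
  !(PySem.Set.isdisjoint granting user_scopes)

-- ===== PRECONDITION & SPEC =====
def Spec_check_scope_permission (user_scopes : List String) (required_scope : String) (out : Bool) : Prop := out = check_scope_permission_alt user_scopes required_scope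
instance (user_scopes : List String) (required_scope : String) (out : Bool) : Decidable (Spec_check_scope_permission user_scopes required_scope out) := by unfold Spec_check_scope_permission; infer_instance

-- ===== CLAIM (what is proved, stated in full; the proofs are below) =====
def Claim_equal_check_scope_permission : Prop := ∀ (user_scopes : List String) (required_scope : String), Dom_check_scope_permission user_scopes required_scope → Spec_check_scope_permission user_scopes required_scope (check_scope_permission user_scopes required_scope)

-- ===== LEMMAS AND PROOFS =====

-- A's loop succeeds iff some user scope's hierarchy entry contains the required scope.
theorem cspLoop_eq_true_iff (r : String) (l : List String) :
    cspLoop r l = true ↔ ∃ u ∈ l, r ∈ SCOPE_HIERARCHY.getD u [] := by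
  induction l with
  | nil => simp [cspLoop]
  | cons u rest ih =>
    simp only [cspLoop]
    cases h : SCOPE_HIERARCHY.get? u with
    | none =>
      simp [ih, PySem.Dict.getD_eq_get?_getD, h]
    | some vs =>
      by_cases hv : r ∈ vs
      · simp [PySem.Dict.getD_eq_get?_getD, h, hv]
      · simp [PySem.Dict.getD_eq_get?_getD, h, hv, ih]

-- A returns true iff the required scope is held directly or via one hierarchy step.
theorem portA_iff (us : List String) (r : String) :
    check_scope_permission us r = true ↔ (r ∈ us ∨ ∃ u ∈ us, r ∈ SCOPE_HIERARCHY.getD u []) := by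
  unfold check_scope_permission
  rcases us with _ | ⟨u, rest⟩
  · simp
  · simp only [if_neg (List.cons_ne_nil u rest)]
    cases hc : (u :: rest).contains r with
    | true =>
      have hmem : r ∈ (u :: rest) := by simpa using hc
      simp only [if_true, true_iff]
      exact Or.inl hmem
    | false =>
      have hr : r ∉ (u :: rest) := by simpa using hc
      simp only [Bool.false_eq_true, if_false, cspLoop_eq_true_iff]
      tauto

-- The forward table evaluates (ofList = repeated insert) to its literal items list.
set_option maxHeartbeats 4000000 in
theorem sh_mk : SCOPE_HIERARCHY = PySem.Dict.mk [
  ("api:admin", ["api:read", "api:write"]),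
  ("api:write", ["api:read"]),
  ("rag:admin", ["rag:read", "rag:write"]),
  ("rag:write", ["rag:read"]),
  ("chat:admin", ["chat:read", "chat:write"]),
  ("chat:write", ["chat:read"]),
  ("users:admin", ["users:read", "users:write"]),
  ("users:write", ["users:read"])] := by decide

-- The forward table, as a decision tree on the looked-up key.
theorem hier_getD (u : String) : SCOPE_HIERARCHY.getD u [] =
    if "api:admin" = u then ["api:read", "api:write"]
    else if "api:write" = u then ["api:read"]
    else if "rag:admin" = u then ["rag:read", "rag:write"]
    else if "rag:write" = u then ["rag:read"]
    else if "chat:admin" = u then ["chat:read", "chat:write"]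
    else if "chat:write" = u then ["chat:read"]
    else if "users:admin" = u then ["users:read", "users:write"]
    else if "users:write" = u then ["users:read"]
    else [] := by
  rw [sh_mk]
  simp only [PySem.Dict.getD_eq_get?_getD, PySem.Dict.get?_mk_cons, beq_iff_eq]
  split_ifs <;> rfl

-- The inverted table evaluates to its literal items list.
set_option maxHeartbeats 4000000 in
theorem granted_by_mk : GRANTED_BY = PySem.Dict.mk [
    ("api:read", ["api:admin", "api:write"]),
    ("api:write", ["api:admin"]),
    ("rag:read", ["rag:admin", "rag:write"]),
    ("rag:write", ["rag:admin"]),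
    ("chat:read", ["chat:admin", "chat:write"]),
    ("chat:write", ["chat:admin"]),
    ("users:read", ["users:admin", "users:write"]),
    ("users:write", ["users:admin"])] := by decide

-- The inverted table, as a decision tree on the looked-up key.
theorem granted_getD (r : String) : GRANTED_BY.getD r [] =
    if "api:read" = r then ["api:admin", "api:write"]
    else if "api:write" = r then ["api:admin"]
    else if "rag:read" = r then ["rag:admin", "rag:write"]
    else if "rag:write" = r then ["rag:admin"]
    else if "chat:read" = r then ["chat:admin", "chat:write"]
    else if "chat:write" = r then ["chat:admin"]
    else if "users:read" = r then ["users:admin", "users:write"]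
    else if "users:write" = r then ["users:admin"]
    else [] := by
  rw [granted_by_mk]
  simp only [PySem.Dict.getD_eq_get?_getD, PySem.Dict.get?_mk_cons, beq_iff_eq]
  split_ifs <;> rfl

-- GRANTED_BY is the exact inverse relation of SCOPE_HIERARCHY.
set_option maxHeartbeats 1000000 in
theorem inverse_key (u r : String) : u ∈ GRANTED_BY.getD r [] ↔ r ∈ SCOPE_HIERARCHY.getD u [] := by
  rw [granted_getD, hier_getD]
  split_ifs <;> simp_all <;> simp_all [eq_comm]

-- B returns true iff the required scope is held directly or via one hierarchy step.
theorem portB_iff (us : List String) (r : String) :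
    check_scope_permission_alt us r = true ↔ (r ∈ us ∨ ∃ u ∈ us, r ∈ SCOPE_HIERARCHY.getD u []) := by
  unfold check_scope_permission_alt
  simp only [Bool.not_eq_true', ← Bool.not_eq_true, PySem.Set.isdisjoint_iff]
  push Not
  constructor
  · rintro ⟨x, hx, hxus⟩
    rw [PySem.Set.mem_ofList, List.mem_cons] at hx
    rcases hx with rfl | hx
    · exact Or.inl hxus
    · exact Or.inr ⟨x, hxus, (inverse_key x r).mp hx⟩
  · rintro (h | ⟨u, hu, hr⟩)
    · exact ⟨r, by simp [PySem.Set.mem_ofList], h⟩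
    · exact ⟨u, by simp [PySem.Set.mem_ofList, (inverse_key u r).mpr hr], hu⟩

-- ===== VERDICT (by name: the statement is the Claim_ definition above) =====
theorem check_scope_permission_spec : Claim_equal_check_scope_permission := by
  intro us r _
  unfold Spec_check_scope_permission
  exact Bool.eq_iff_iff.mpr ((portA_iff us r).trans (portB_iff us r).symm)
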